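-- pv_equiv track=rewrite | github.com/S0LERA/RedesII-Gymkhana | Operator.py | StrToArr
-- ===== SOURCE A (Python) =====
-- def StrToArr(INFStr):
--     ArrToSpl = "";
--     for i in INFStr:
--         if(i == '('):
--             ArrToSpl = ArrToSpl + ' ( ';
--         elif(i == ')'):
--             ArrToSpl = ArrToSpl + ' ) ';
--         elif(i == '*'):
--             ArrToSpl = ArrToSpl + ' * ';
--         elif(i == '/'):
--             ArrToSpl = ArrToSpl + ' / ';
--         elif(i == '+'):
--             ArrToSpl = ArrToSpl + ' + ';
--         elif(i == '-'):
--             ArrToSpl = ArrToSpl + ' - ';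
--         else:
--             ArrToSpl = ArrToSpl + i;
--
--     SplArr= ArrToSpl.split();
--     return SplArr;
-- ===== SOURCE B (Python) =====
-- def StrToArr(INFStr):
--     OPS = "()*+/-"
--     tokens = []
--     cur = []
--     for ch in INFStr:
--         if ch in OPS:
--             if cur:
--                 tokens.append(''.join(cur))
--                 cur = []
--             tokens.append(ch)
--         elif ch.isspace():
--             if cur:
--                 tokens.append(''.join(cur))
--                 cur = []
--         else:
--             cur.append(ch)
--     if cur:
--         tokens.append(''.join(cur))
--     return tokens
-- ===== Notes on version B (the rewrite author's own statement) =====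
-- stated objective: faster
-- what changed: B tokenizes in a single pass with an explicit current-token buffer, emitting tokens directly, instead of building a space-padded copy of the string via repeated concatenation and then calling str.split().
import Mathlib
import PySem

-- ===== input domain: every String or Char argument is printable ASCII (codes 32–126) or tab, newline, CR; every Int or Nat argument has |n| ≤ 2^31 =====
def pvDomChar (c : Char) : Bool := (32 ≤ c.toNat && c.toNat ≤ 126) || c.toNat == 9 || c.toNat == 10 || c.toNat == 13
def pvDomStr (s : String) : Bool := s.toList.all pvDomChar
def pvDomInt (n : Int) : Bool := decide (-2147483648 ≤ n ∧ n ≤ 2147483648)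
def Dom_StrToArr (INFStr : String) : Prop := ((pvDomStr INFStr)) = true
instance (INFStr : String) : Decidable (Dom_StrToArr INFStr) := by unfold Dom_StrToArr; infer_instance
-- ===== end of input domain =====

-- B tokenizes in a single pass with an explicit current-token buffer instead of
-- building a space-padded copy of the string and calling str.split() (alternative decomposition).

-- ===== PORT A =====
-- one iteration of A's loop: what gets appended to ArrToSpl for character i
def padA (i : Char) : List Char :=
  if i = '(' then [' ', '(', ' ']
  else if i = ')' then [' ', ')', ' ']
  else if i = '*' then [' ', '*', ' ']
  else if i = '/' then [' ', '/', ' ']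
  else if i = '+' then [' ', '+', ' ']
  else if i = '-' then [' ', '-', ' ']
  else [i]

def StrToArr (INFStr : String) : List String :=
  let ArrToSpl : List Char := INFStr.toList.foldl (fun acc i => acc ++ padA i) []
  (PySem.Chars.split₀ ArrToSpl).map String.ofList

-- ===== PORT B =====
def opsB : List Char := ['(', ')', '*', '/', '+', '-']

-- flush the current buffer into the token list (B's "if cur: tokens.append(...)")
def flushB (tokens : List (List Char)) (cur : List Char) : List (List Char) :=
  if cur.isEmpty then tokens else tokens ++ [cur]

def stepB (st : List (List Char) × List Char) (ch : Char) : List (List Char) × List Char :=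
  if opsB.contains ch then (flushB st.1 st.2 ++ [[ch]], [])
  else if PySem.Chars.isspace ch then (flushB st.1 st.2, [])
  else (st.1, st.2 ++ [ch])

def StrToArr_alt (INFStr : String) : List String :=
  let st := INFStr.toList.foldl stepB ([], [])
  (flushB st.1 st.2).map String.ofList

-- ===== PRECONDITION & SPEC =====
def Spec_StrToArr (INFStr : String) (out : List String) : Prop := out = StrToArr_alt INFStr
instance (INFStr : String) (out : List String) : Decidable (Spec_StrToArr INFStr out) := by unfold Spec_StrToArr; infer_instance

-- ===== CLAIM (what is proved, stated in full; the proofs are below) =====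
def Claim_equal_StrToArr : Prop := ∀ (INFStr : String), Dom_StrToArr INFStr → Spec_StrToArr INFStr (StrToArr INFStr)

-- ===== LEMMAS AND PROOFS =====

theorem flushB_append (a t : List (List Char)) (cur : List Char) :
    flushB (a ++ t) cur = a ++ flushB t cur := by
  unfold flushB; split_ifs <;> simp

theorem stepB_shift (st : List (List Char) × List Char) (c : Char) :
    stepB st c = (st.1 ++ (stepB ([], st.2) c).1, (stepB ([], st.2) c).2) := by
  unfold stepB flushB
  split_ifs <;> simp

theorem foldl_stepB_shift (l : List Char) (t : List (List Char)) (cur : List Char) :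
    l.foldl stepB (t, cur) = (t ++ (l.foldl stepB ([], cur)).1, (l.foldl stepB ([], cur)).2) := by
  induction l generalizing t cur with
  | nil => simp
  | cons c l ih =>
      simp only [List.foldl_cons]
      rw [stepB_shift (t, cur) c, ih]
      conv_rhs => rw [← Prod.mk.eta (p := stepB ([], cur) c), ih]
      simp

-- one step of split₀.go on a whitespace character
theorem go_space (c : Char) (h : PySem.Chars.isspace c = true)
    (rest cur : List Char) (acc : List (List Char)) :
    PySem.Chars.split₀.go (c :: rest) cur acc
      = PySem.Chars.split₀.go rest [] (if cur.isEmpty then acc else cur.reverse :: acc) := by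
  conv_lhs => rw [PySem.Chars.split₀.go]
  rw [if_pos h]
  split_ifs <;> rfl

-- one step of split₀.go on a non-whitespace character
theorem go_char (c : Char) (h : PySem.Chars.isspace c = false)
    (rest cur : List Char) (acc : List (List Char)) :
    PySem.Chars.split₀.go (c :: rest) cur acc = PySem.Chars.split₀.go rest (c :: cur) acc := by
  conv_lhs => rw [PySem.Chars.split₀.go]
  rw [if_neg (by simp [h])]

-- an operator padded ' c ' by A corresponds to B flushing and emitting the operator token
theorem go_op (c : Char) (hsp : PySem.Chars.isspace c = false)
    (l cur : List Char) (acc : List (List Char))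
    (ih : ∀ (cur : List Char) (acc : List (List Char)),
      PySem.Chars.split₀.go (l.flatMap padA) cur acc
        = acc.reverse ++ flushB (l.foldl stepB ([], cur.reverse)).1 (l.foldl stepB ([], cur.reverse)).2) :
    PySem.Chars.split₀.go (' ' :: c :: ' ' :: l.flatMap padA) cur acc
      = acc.reverse
        ++ flushB (l.foldl stepB (flushB [] cur.reverse ++ [[c]], [])).1
                  (l.foldl stepB (flushB [] cur.reverse ++ [[c]], [])).2 := by
  rw [go_space ' ' (by decide), go_char c hsp, go_space ' ' (by decide)]
  simp only [List.isEmpty_cons, Bool.false_eq_true, if_false]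
  rw [ih]
  rw [foldl_stepB_shift l (flushB [] cur.reverse ++ [[c]]) [], flushB_append]
  by_cases hcur : cur.isEmpty = true <;>
    simp_all [flushB, List.isEmpty_iff]

-- the heart of the proof: splitting A's padded string equals B's one-pass loop,
-- generalized over split₀.go's state (reversed pending word `cur`, reversed tokens `acc`)
theorem goA (l : List Char) : ∀ (cur : List Char) (acc : List (List Char)),
    PySem.Chars.split₀.go (l.flatMap padA) cur acc
      = acc.reverse ++ flushB (l.foldl stepB ([], cur.reverse)).1 (l.foldl stepB ([], cur.reverse)).2 := by
  induction l with
  | nil =>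
      intro cur acc
      simp only [List.flatMap_nil, PySem.Chars.split₀.go, List.foldl_nil, flushB]
      split_ifs with h₁ h₂ h₂ <;> simp_all
  | cons c l ih =>
      intro cur acc
      by_cases h1 : c = '('
      · subst h1
        rw [show List.flatMap padA ('(' :: l) = ' ' :: '(' :: ' ' :: l.flatMap padA by simp [padA]]
        rw [go_op '(' (by decide) l cur acc ih]
        simp [stepB, opsB]
      by_cases h2 : c = ')'
      · subst h2
        rw [show List.flatMap padA (')' :: l) = ' ' :: ')' :: ' ' :: l.flatMap padA by simp [padA]]
        rw [go_op ')' (by decide) l cur acc ih]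
        simp [stepB, opsB]
      by_cases h3 : c = '*'
      · subst h3
        rw [show List.flatMap padA ('*' :: l) = ' ' :: '*' :: ' ' :: l.flatMap padA by simp [padA]]
        rw [go_op '*' (by decide) l cur acc ih]
        simp [stepB, opsB]
      by_cases h4 : c = '/'
      · subst h4
        rw [show List.flatMap padA ('/' :: l) = ' ' :: '/' :: ' ' :: l.flatMap padA by simp [padA]]
        rw [go_op '/' (by decide) l cur acc ih]
        simp [stepB, opsB]
      by_cases h5 : c = '+'
      · subst h5
        rw [show List.flatMap padA ('+' :: l) = ' ' :: '+' :: ' ' :: l.flatMap padA by simp [padA]]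
        rw [go_op '+' (by decide) l cur acc ih]
        simp [stepB, opsB]
      by_cases h6 : c = '-'
      · subst h6
        rw [show List.flatMap padA ('-' :: l) = ' ' :: '-' :: ' ' :: l.flatMap padA by simp [padA]]
        rw [go_op '-' (by decide) l cur acc ih]
        simp [stepB, opsB]
      -- else branch of A: padA c = [c]
      have hpad : List.flatMap padA (c :: l) = c :: l.flatMap padA := by
        simp [padA, h1, h2, h3, h4, h5, h6]
      have hops : opsB.contains c = false := by
        simp [opsB, h1, h2, h3, h4, h5, h6]
      rw [hpad]
      by_cases hsp : PySem.Chars.isspace c = true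
      · rw [go_space c hsp, ih]
        have hstep : stepB ([], cur.reverse) c = (flushB [] cur.reverse, []) := by
          simp only [stepB, hops, hsp, Bool.false_eq_true, if_false, if_true]
        simp only [List.foldl_cons, hstep]
        rw [foldl_stepB_shift l (flushB [] cur.reverse) [], flushB_append]
        by_cases hcur : cur.isEmpty = true <;>
          simp_all [flushB, List.isEmpty_iff]
      · rw [go_char c (by simp_all), ih]
        simp only [List.foldl_cons, stepB, hops, Bool.false_eq_true, if_false]
        rw [if_neg hsp]
        simp

-- ===== VERDICT (by name: the statement is the Claim_ definition above) =====
theorem StrToArr_spec : Claim_equal_StrToArr := by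
  intro s _
  unfold Spec_StrToArr StrToArr StrToArr_alt
  rw [PySem.List.foldl_append_eq_flatMap padA s.toList []]
  simp only [List.nil_append, PySem.Chars.split₀]
  rw [goA s.toList [] []]
  simp
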